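-- pv_equiv track=rewrite | github.com/PrinceSinghhub/GFG-Questions | Mr. Modulo and Arrays.py | maxModValue
-- ===== SOURCE A (Python) =====
-- import bisect
--
-- def maxModValue(arr, n):
--     ans = 0
--
--     # Sort the array[] by using inbuilt
--     # sort function
--     arr = sorted(arr)
--
--     for j in range(n - 2, -1, -1):
--
--         # Break loop if answer is greater or equals to
--         # the arr[j] as any number modulo with arr[j]
--         # can only give maximum value up-to arr[j]-1
--         if (ans >= arr[j]):
--             break
--
--         # If both elements are same then skip the next
--         # loop as it would be worthless to repeat the
--         # rest process for same value
--         if (arr[j] == arr[j + 1]):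
--             continue
--         i = 2 * arr[j]
--         while (i <= arr[n - 1] + arr[j]):
--             # Fetch the index which is greater than or
--             # equals to arr[i] by using binary search
--             # inbuilt lower_bound() function of C++
--             ind = bisect.bisect_left(arr, i)
--             # Update the answer
--             ans = max(ans, arr[ind - 1] % arr[j])
--             i += arr[j]
--
--     return ans
-- ===== SOURCE B (Python) =====
-- def maxModValue(arr, n):
--     # Brute force: try every ordered pair with a nonzero divisor not
--     # exceeding the dividend, keeping the running maximum remainder.
--     ans = 0
--     for i in range(n):
--         for j in range(n):
--             if arr[j] != 0 and arr[i] >= arr[j]: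
--                 ans = max(ans, arr[i] % arr[j])
--     return ans
-- ===== Notes on version B (the rewrite author's own statement) =====
-- stated objective: simpler
-- what changed: Replaced the sort + harmonic multiple-enumeration with bisect lower-bounds by a plain double loop over all ordered pairs with a nonzero divisor not exceeding the dividend; B is far shorter and clearer but asymptotically slower.
-- outside the precondition, e.g. on maxModValue([3, 5, 2], 2): A returns 1, B returns 2; on maxModValue([3], 2): A raises IndexError, B raises IndexError
import Mathlib
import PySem

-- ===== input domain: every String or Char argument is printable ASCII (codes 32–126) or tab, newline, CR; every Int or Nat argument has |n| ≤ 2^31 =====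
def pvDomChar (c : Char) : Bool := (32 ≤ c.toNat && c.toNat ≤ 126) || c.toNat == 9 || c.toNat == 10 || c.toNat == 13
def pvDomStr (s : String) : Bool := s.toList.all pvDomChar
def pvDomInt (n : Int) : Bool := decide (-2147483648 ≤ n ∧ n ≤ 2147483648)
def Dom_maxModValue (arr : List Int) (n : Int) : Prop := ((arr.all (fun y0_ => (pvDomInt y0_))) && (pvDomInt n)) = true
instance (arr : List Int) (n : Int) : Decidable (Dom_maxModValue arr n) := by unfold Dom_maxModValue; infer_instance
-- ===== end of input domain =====

-- B replaces A's sort + harmonic multiple-enumeration with bisect lower-bounds by a plain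
-- double loop over all ordered pairs with a nonzero divisor ≤ dividend (simpler, not faster).

-- ===== PORT A =====
-- Python's `i = 2*d; while i <= L: ... ; i += d` iterates exactly over range(2*d, L+1, d)
-- when the step d is positive; whenever A's inner loop runs, its divisor d = arr[j] is
-- positive (ans ≥ 0 and the loop broke unless ans < arr[j]), so this fold is exact there.
-- bisect.bisect_left is PySem.List.bisectLeft.
def pvInnerA (s : List Int) (d L : Int) (ans : Int) : Int :=
  (PySem.List.pyRange (2*d) (L+1) d).foldl
    (fun a i =>
      max a (PySem.Int.mod (PySem.List.pyGetD s ((PySem.List.bisectLeft s i : Int) - 1) 0) d)) ans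

-- the `for j in range(n-2, -1, -1)` loop with its break / continue
def pvOuterA (s : List Int) (n : Int) : List Int → Int → Int
  | [], ans => ans
  | j :: rest, ans =>
    if PySem.List.pyGetD s j 0 ≤ ans then ans          -- break: ans >= arr[j]
    else if PySem.List.pyGetD s j 0 = PySem.List.pyGetD s (j+1) 0 then
      pvOuterA s n rest ans                             -- continue
    else
      pvOuterA s n rest
        (pvInnerA s (PySem.List.pyGetD s j 0)
          (PySem.List.pyGetD s (n-1) 0 + PySem.List.pyGetD s j 0) ans)

def maxModValue (arr : List Int) (n : Int) : Int :=
  pvOuterA (PySem.List.sorted arr (fun x => x) false) n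
    (PySem.List.pyRange (n-2) (-1) (-1)) 0

-- ===== PORT B =====
def maxModValue_alt (arr : List Int) (n : Int) : Int :=
  (PySem.List.pyRange 0 n 1).foldl (fun ans i =>
    (PySem.List.pyRange 0 n 1).foldl (fun ans j =>
      if PySem.List.pyGetD arr j 0 ≠ 0 ∧ PySem.List.pyGetD arr j 0 ≤ PySem.List.pyGetD arr i 0 then
        max ans (PySem.Int.mod (PySem.List.pyGetD arr i 0) (PySem.List.pyGetD arr j 0))
      else ans) ans) 0

-- ===== PRECONDITION & SPEC =====
-- Pre_ admits n ≤ 0 (no pair exists) and the problem's documented contract n == len(arr);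
-- for 1 ≤ n ≠ len(arr) A raises IndexError (n > len) or returns accidental values mixing
-- prefix and out-of-prefix elements (n < len), so those inputs are excluded.
def Pre_maxModValue (arr : List Int) (n : Int) : Prop :=
  n ≤ 0 ∨ n = (arr.length : Int)
instance (arr : List Int) (n : Int) : Decidable (Pre_maxModValue arr n) := by
  unfold Pre_maxModValue; infer_instance

def pvWitness_maxModValue : List Int × Int := ([3, 0, 7, 4], 4)

def Spec_maxModValue (arr : List Int) (n : Int) (out : Int) : Prop := out = maxModValue_alt arr n
instance (arr : List Int) (n : Int) (out : Int) : Decidable (Spec_maxModValue arr n out) := by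
  unfold Spec_maxModValue; infer_instance

-- ===== CLAIM (what is proved, stated in full; the proofs are below) =====
def Claim_equal_maxModValue : Prop := ∀ (arr : List Int) (n : Int), Dom_maxModValue arr n → Pre_maxModValue arr n → Spec_maxModValue arr n (maxModValue arr n)

-- ===== LEMMAS AND PROOFS =====

-- generic upper bound for a running max
theorem pvFoldlMaxLe {β : Type} (l : List β) (f : β → Int) (C : Int) :
    ∀ a : Int, (∀ i ∈ l, f i ≤ C) → a ≤ C →
      l.foldl (fun a i => max a (f i)) a ≤ C := by
  induction l with
  | nil => intro a _ ha; simpa using ha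
  | cons i t ih =>
    intro a h ha
    simp only [List.foldl_cons]
    exact ih _ (fun j hj => h j (List.mem_cons_of_mem _ hj))
      (max_le ha (h i (List.mem_cons_self)))

-- ---- B-side loop facts ----
theorem pvAltInner_ge_acc (x : Int) (l : List Int) :
    ∀ a : Int, a ≤ l.foldl
      (fun ans d => if d ≠ 0 ∧ d ≤ x then max ans (PySem.Int.mod x d) else ans) a := by
  induction l with
  | nil => intro a; simp
  | cons d t ih =>
    intro a
    simp only [List.foldl_cons]
    refine le_trans ?_ (ih _)
    split <;> simp
theorem pvAltInner_le (x C : Int) (l : List Int) :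
    ∀ a : Int, (∀ d ∈ l, d ≠ 0 → d ≤ x → PySem.Int.mod x d ≤ C) → a ≤ C →
      l.foldl (fun ans d => if d ≠ 0 ∧ d ≤ x then max ans (PySem.Int.mod x d) else ans) a ≤ C := by
  induction l with
  | nil => intro a _ ha; simpa using ha
  | cons d t ih =>
    intro a h ha
    simp only [List.foldl_cons]
    refine ih _ (fun e he he0 hex => h e (List.mem_cons_of_mem _ he) he0 hex) ?_
    split
    · rename_i hg
      exact max_le ha (h d List.mem_cons_self hg.1 hg.2)
    · exact ha
theorem pvAltInner_reaches (x : Int) (l : List Int) (d : Int) (hd : d ∈ l)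
    (hd0 : d ≠ 0) (hdx : d ≤ x) :
    ∀ a : Int, PySem.Int.mod x d ≤
      l.foldl (fun ans d => if d ≠ 0 ∧ d ≤ x then max ans (PySem.Int.mod x d) else ans) a := by
  induction l with
  | nil => cases hd
  | cons e t ih =>
    intro a
    simp only [List.foldl_cons]
    rcases List.mem_cons.mp hd with h | h
    · subst h
      refine le_trans ?_ (pvAltInner_ge_acc x t _)
      simp [hd0, hdx]
    · exact ih h _

theorem pvAlt_ge_acc (arr l : List Int) :
    ∀ a : Int, a ≤ l.foldl (fun ans x =>
      arr.foldl (fun ans d => if d ≠ 0 ∧ d ≤ x then max ans (PySem.Int.mod x d) else ans) ans) a := by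
  induction l with
  | nil => intro a; simp
  | cons x t ih =>
    intro a
    simp only [List.foldl_cons]
    exact le_trans (pvAltInner_ge_acc x arr a) (ih _)

-- element-level form of B's double index loop (proof helper)
def pvAltEl (arr : List Int) : Int :=
  arr.foldl (fun ans x =>
    arr.foldl (fun ans d => if d ≠ 0 ∧ d ≤ x then max ans (PySem.Int.mod x d) else ans) ans) 0

-- with n = len(arr), B's index loops are loops over the elements
theorem pvAlt_eq_el (arr : List Int) :
    maxModValue_alt arr (arr.length : Int) = pvAltEl arr := by
  unfold maxModValue_alt pvAltEl
  rw [PySem.List.foldl_pyRange_zero_pyGetD' arr 0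
    (fun ans x => (PySem.List.pyRange 0 (arr.length : Int) 1).foldl (fun ans j =>
        if PySem.List.pyGetD arr j 0 ≠ 0 ∧ PySem.List.pyGetD arr j 0 ≤ x then
          max ans (PySem.Int.mod x (PySem.List.pyGetD arr j 0)) else ans) ans) 0]
  congr 1
  funext ans x
  rw [PySem.List.foldl_pyRange_zero_pyGetD' arr 0
    (fun ans d => if d ≠ 0 ∧ d ≤ x then max ans (PySem.Int.mod x d) else ans) ans]

theorem pvAlt_nonneg (arr : List Int) : 0 ≤ pvAltEl arr :=
  pvAlt_ge_acc arr arr 0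

theorem pvAlt_reaches (arr : List Int) (x d : Int) (hx : x ∈ arr) (hd : d ∈ arr)
    (hd0 : d ≠ 0) (hdx : d ≤ x) : PySem.Int.mod x d ≤ pvAltEl arr := by
  unfold pvAltEl
  have : ∀ (l : List Int) (a : Int), x ∈ l →
      PySem.Int.mod x d ≤ l.foldl (fun ans x =>
        arr.foldl (fun ans d => if d ≠ 0 ∧ d ≤ x then max ans (PySem.Int.mod x d) else ans) ans) a := by
    intro l
    induction l with
    | nil => intro a h; cases h
    | cons y t ih =>
      intro a h
      simp only [List.foldl_cons]
      rcases List.mem_cons.mp h with h | h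
      · subst h
        exact le_trans (pvAltInner_reaches x arr d hd hd0 hdx a) (pvAlt_ge_acc arr t _)
      · exact ih _ h
  exact this arr 0 hx

theorem pvAlt_le (arr : List Int) (C : Int)
    (h : ∀ x ∈ arr, ∀ d ∈ arr, d ≠ 0 → d ≤ x → PySem.Int.mod x d ≤ C) (h0 : 0 ≤ C) :
    pvAltEl arr ≤ C := by
  unfold pvAltEl
  have : ∀ (l : List Int) (a : Int),
      (∀ x ∈ l, ∀ d ∈ arr, d ≠ 0 → d ≤ x → PySem.Int.mod x d ≤ C) →
      a ≤ C → l.foldl (fun ans x =>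
        arr.foldl (fun ans d => if d ≠ 0 ∧ d ≤ x then max ans (PySem.Int.mod x d) else ans) ans) a ≤ C := by
    intro l
    induction l with
    | nil => intro a _ ha; simpa using ha
    | cons y t ih =>
      intro a hl ha
      simp only [List.foldl_cons]
      refine ih _ (fun x hx => hl x (List.mem_cons_of_mem _ hx)) ?_
      exact pvAltInner_le y C arr a (hl y List.mem_cons_self) ha
  exact this arr 0 h h0

-- ---- sorted-list facts ----
theorem pvSortedMono (s : List Int) (hp : s.Pairwise (· ≤ ·)) {i j : Nat}
    (hij : i ≤ j) (hj : j < s.length) : s[i]'(lt_of_le_of_lt hij hj) ≤ s[j] := by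
  rcases Nat.eq_or_lt_of_le hij with h | h
  · subst h; exact le_refl _
  · exact (List.pairwise_iff_getElem.mp hp) i j _ hj h

theorem pvMemLeLast (s : List Int) (hp : s.Pairwise (· ≤ ·)) (x : Int) (hx : x ∈ s) :
    x ≤ s[s.length - 1]'(by
      have := List.length_pos_of_mem hx; omega) := by
  obtain ⟨i, hi, rfl⟩ := List.mem_iff_getElem.mp hx
  exact pvSortedMono s hp (by omega) (by omega)

-- largest occurrence of d in sorted s, located with bisectLeft at d+1
theorem pvExistsSuccGt (s : List Int) (hp : s.Pairwise (· ≤ ·)) (d y : Int)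
    (hd : d ∈ s) (hy : y ∈ s) (hlt : d < y) :
    ∃ j : Nat, ∃ hj : j + 1 < s.length, s[j]'(by omega) = d ∧ d < s[j+1]'hj := by
  obtain ⟨hle, hlt2, hge⟩ := PySem.List.bisectLeft_spec s (d+1) hp
  obtain ⟨iD, hiD, hsiD⟩ := List.mem_iff_getElem.mp hd
  obtain ⟨iY, hiY, hsiY⟩ := List.mem_iff_getElem.mp hy
  set ind := PySem.List.bisectLeft s (d+1) with hind
  have hiDlt : iD < ind := by
    by_contra h
    have := hge iD hiD (by omega)
    omega
  have hindle : ind ≤ iY := by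
    by_contra h
    have := hlt2 iY hiY (by omega)
    omega
  refine ⟨ind - 1, by omega, ?_, ?_⟩
  · have h1 : s[ind-1]'(by omega) < d + 1 := hlt2 (ind-1) (by omega) (by omega)
    have h2 : s[iD] ≤ s[ind-1]'(by omega) := pvSortedMono s hp (by omega) (by omega)
    omega
  · have h3 : d + 1 ≤ s[ind-1+1]'(by omega) := hge (ind-1+1) (by omega) (by omega)
    omega

-- ---- A-side loop facts ----
theorem pvInnerA_ge_acc (s : List Int) (d L ans : Int) : ans ≤ pvInnerA s d L ans :=
  (PySem.List.le_foldl_max_int _ _ _).1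

theorem pvOuterA_ge_acc (s : List Int) (n : Int) (l : List Int) :
    ∀ ans : Int, ans ≤ pvOuterA s n l ans := by
  induction l with
  | nil => intro ans; simp [pvOuterA]
  | cons j t ih =>
    intro ans
    simp only [pvOuterA]
    split
    · exact le_refl _
    · split
      · exact ih ans
      · exact le_trans (pvInnerA_ge_acc _ _ _ _) (ih _)

-- soundness: every value the inner loop folds in is x' % d' for nonzero elements d' ≤ x' of s
theorem pvInnerA_le (s : List Int) (hp : s.Pairwise (· ≤ ·)) (d L ans C : Int)
    (hds : d ∈ s) (hd1 : 1 ≤ d)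
    (HC : ∀ e ∈ s, ∀ d' ∈ s, 1 ≤ d' → d' ≤ e → PySem.Int.mod e d' ≤ C) (ha : ans ≤ C) :
    pvInnerA s d L ans ≤ C := by
  unfold pvInnerA
  refine pvFoldlMaxLe _ _ C ans ?_ ha
  intro i hi
  have hdpos : (0:Int) < d := by omega
  have h2d : 2*d ≤ i := ((PySem.List.mem_pyRange_iff_of_pos hdpos i).mp hi).1
  obtain ⟨jd, hjd, hsjd⟩ := List.mem_iff_getElem.mp hds
  obtain ⟨hle, hlt2, hge⟩ := PySem.List.bisectLeft_spec s i hp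
  set ind := PySem.List.bisectLeft s i with hind
  have hjdlt : jd < ind := by
    by_contra h
    have := hge jd hjd (by omega)
    omega
  have hidx : PySem.List.pyGetD s ((ind : Int) - 1) 0 = s[ind-1]'(by omega) := by
    rw [PySem.List.pyGetD_eq_getElem s 0 (by omega) (by omega)]
    congr 1 <;> omega
  rw [hidx]
  have hde : d ≤ s[ind-1]'(by omega) := by
    have := pvSortedMono s hp (show jd ≤ ind - 1 by omega) (by omega)
    omega
  exact HC _ (List.getElem_mem _) d hds hd1 hde

theorem pvOuterA_le (s : List Int) (hp : s.Pairwise (· ≤ ·)) (n : Int) (C : Int)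
    (HC : ∀ e ∈ s, ∀ d' ∈ s, 1 ≤ d' → d' ≤ e → PySem.Int.mod e d' ≤ C) :
    ∀ (l : List Int), (∀ j ∈ l, 0 ≤ j ∧ j < (s.length : Int)) →
      ∀ ans : Int, 0 ≤ ans → ans ≤ C → pvOuterA s n l ans ≤ C := by
  intro l
  induction l with
  | nil => intro _ ans _ ha; simpa [pvOuterA] using ha
  | cons j t ih =>
    intro hl ans h0 ha
    have hj := hl j List.mem_cons_self
    have ht : ∀ j ∈ t, 0 ≤ j ∧ j < (s.length : Int) :=
      fun j hjt => hl j (List.mem_cons_of_mem _ hjt)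
    simp only [pvOuterA]
    split
    · exact ha
    · rename_i hbrk
      have hdval : PySem.List.pyGetD s j 0 = s[j.toNat]'(by omega) :=
        PySem.List.pyGetD_eq_getElem s 0 (by omega) (by omega)
      -- arr[j] is an element of s, positive because ans < arr[j] and 0 ≤ ans
      have hds : PySem.List.pyGetD s j 0 ∈ s := by
        rw [hdval]; exact List.getElem_mem _
      have hd1 : 1 ≤ PySem.List.pyGetD s j 0 := by omega
      split
      · exact ih ht ans h0 ha
      · exact ih ht _ (le_trans h0 (pvInnerA_ge_acc _ _ _ _))
          (pvInnerA_le s hp _ _ ans C hds hd1 HC ha)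

-- completeness of the inner loop: the multiple (x/d + 1)*d is visited and yields ≥ x % d
theorem pvInnerA_reaches (s : List Int) (hp : s.Pairwise (· ≤ ·)) (x d M L ans : Int)
    (hx : x ∈ s) (hd1 : 1 ≤ d) (hdx : d ≤ x)
    (hM : ∀ y ∈ s, y ≤ M) (hL : L = M + d) :
    PySem.Int.mod x d ≤ pvInnerA s d L ans := by
  have hdpos : (0:Int) < d := by omega
  set q : Int := x / d with hq
  have hdm : d * q + x % d = x := by rw [hq, Int.emod_def]; ring
  have hr0 : 0 ≤ x % d := Int.emod_nonneg x (by omega)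
  have hrd : x % d < d := Int.emod_lt_of_pos x hdpos
  have hq1 : 1 ≤ q := by
    rw [hq]
    exact (Int.le_ediv_iff_mul_le hdpos).mpr (by omega)
  have hqle : d * q ≤ x := by omega
  have hqlt : x < d * (q + 1) := by linarith [hdm, hrd]
  have hmmem : (q + 1) * d ∈ PySem.List.pyRange (2*d) (L+1) d := by
    rw [PySem.List.mem_pyRange_iff_of_pos hdpos]
    refine ⟨by nlinarith, by nlinarith [hM x hx], ⟨q - 1, by ring⟩⟩
  obtain ⟨hle, hlt2, hge⟩ := PySem.List.bisectLeft_spec s ((q+1)*d) hp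
  set ind := PySem.List.bisectLeft s ((q+1)*d) with hind
  obtain ⟨ix, hix, hsix⟩ := List.mem_iff_getElem.mp hx
  have hixlt : ix < ind := by
    by_contra h
    have := hge ix hix (by omega)
    nlinarith
  have hidx : PySem.List.pyGetD s ((ind : Int) - 1) 0 = s[ind-1]'(by omega) := by
    rw [PySem.List.pyGetD_eq_getElem s 0 (by omega) (by omega)]
    congr 1 <;> omega
  set e : Int := s[ind-1]'(by omega) with he
  have hem : e < (q+1)*d := hlt2 (ind-1) (by omega) (by omega)
  have hxe : x ≤ e := by
    rw [← hsix, he]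
    exact pvSortedMono s hp (by omega) (by omega)
  have hemod : e % d = e - d * q := by
    have h1 : e - d * q + d * q = e := by ring
    calc e % d = (e - d * q + d * q) % d := by rw [h1]
    _ = (e - d * q) % d := Int.add_mul_emod_self_left (e - d * q) d q
    _ = e - d * q := Int.emod_eq_of_lt (by omega) (by nlinarith)
  have hxmod : x % d = x - d * q := by omega
  have hstep : PySem.Int.mod x d ≤ PySem.Int.mod e d := by
    rw [PySem.Int.mod_eq_emod_of_pos hdpos, PySem.Int.mod_eq_emod_of_pos hdpos, hemod, hxmod]
    omega
  refine le_trans hstep ?_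
  unfold pvInnerA
  have hall := (PySem.List.le_foldl_max_int (PySem.List.pyRange (2*d) (L+1) d)
    (fun i => PySem.Int.mod (PySem.List.pyGetD s ((PySem.List.bisectLeft s i : Int) - 1) 0) d) ans).2
  have h2 := hall ((q+1)*d) hmmem
  simpa [← hind, hidx, ← he] using h2

theorem pvOuterA_reaches (s : List Int) (hp : s.Pairwise (· ≤ ·)) (n : Int)
    (hn : n = (s.length : Int)) (x d : Int) (hx : x ∈ s) (hd1 : 1 ≤ d) (hdx : d ≤ x)
    (j : Nat) (hj1 : j + 1 < s.length) (hsj : s[j]'(by omega) = d) (hlt : d < s[j+1]'hj1) :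
    ∀ (k : Nat), j < k → k ≤ s.length - 1 →
      ∀ ans : Int, 0 ≤ ans →
        PySem.Int.mod x d ≤ pvOuterA s n (PySem.List.pyRange ((k : Int) - 1) (-1) (-1)) ans := by
  intro k
  induction k with
  | zero => intro h; omega
  | succ k ih =>
    intro hjk hkle ans h0
    have hklen : k < s.length := by omega
    have hcast : ((k + 1 : Nat) : Int) - 1 = (k : Int) := by push_cast; ring
    rw [hcast, PySem.List.pyRange_neg_one_cons (by omega)]
    simp only [pvOuterA]
    have hdval : PySem.List.pyGetD s (k : Int) 0 = s[k] := by
      rw [PySem.List.pyGetD_eq_getElem s 0 (by omega) (by omega)]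
      congr 1 <;> omega
    have hdval2 : PySem.List.pyGetD s ((k : Int) + 1) 0 = s[k+1]'(by omega) := by
      rw [PySem.List.pyGetD_eq_getElem s 0 (by omega) (by omega)]
      congr 1 <;> omega
    have hmodlt : PySem.Int.mod x d < d := PySem.Int.mod_lt x (by omega)
    have hjd : s[j]'(by omega) ≤ s[k] := pvSortedMono s hp (by omega) (by omega)
    split
    · rename_i hbrk
      rw [hdval] at hbrk
      omega
    · rename_i hbrk
      rcases Nat.lt_succ_iff_lt_or_eq.mp hjk with hjlt | hjeq
      · split
        · exact ih hjlt (by omega) ans h0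
        · exact ih hjlt (by omega) _ (le_trans h0 (pvInnerA_ge_acc _ _ _ _))
      · subst hjeq
        have hguard : ¬ (PySem.List.pyGetD s (j : Int) 0 = PySem.List.pyGetD s ((j : Int)+1) 0) := by
          rw [hdval, hdval2, hsj]
          omega
        rw [if_neg (by exact_mod_cast hguard)]
        have hlast : PySem.List.pyGetD s (n-1) 0 = s[s.length - 1]'(by omega) := by
          rw [hn]
          rw [PySem.List.pyGetD_eq_getElem s 0 (by omega) (by push_cast; omega)]
          congr 1 <;> omega
        refine le_trans ?_ (pvOuterA_ge_acc s n _ _)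
        rw [hdval, hsj, hlast]
        exact pvInnerA_reaches s hp x d _ _ ans hx hd1 hdx
          (fun y hy => pvMemLeLast s hp y hy) rfl

-- B returns 0 when n ≤ 0 (empty ranges)
theorem pvAlt_nonpos (arr : List Int) (n : Int) (hn : n ≤ 0) : maxModValue_alt arr n = 0 := by
  unfold maxModValue_alt
  rw [PySem.List.pyRange_one_eq_nil hn]
  rfl

-- A returns 0 when n ≤ 1 (the outer range is empty)
theorem pvA_le_one (arr : List Int) (n : Int) (hn : n ≤ 1) : maxModValue arr n = 0 := by
  unfold maxModValue
  rw [PySem.List.pyRange_neg_one_eq_nil (by omega)]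
  rfl

-- ===== VERDICT (by name: the statement is the Claim_ definition above) =====
theorem maxModValue_spec : Claim_equal_maxModValue := by
  unfold Claim_equal_maxModValue Spec_maxModValue
  intro arr n _ hpre
  rcases hpre with hn0 | hn
  · rw [pvA_le_one arr n (by omega), pvAlt_nonpos arr n hn0]
  · -- the real case: n = len(arr)
    rw [hn, pvAlt_eq_el arr, ← hn]
    have hp : (PySem.List.sorted arr (fun x => x) false).Pairwise (· ≤ ·) := by
      simpa using PySem.List.sorted_pairwise arr (fun x => x)
    have hperm := PySem.List.sorted_perm arr (fun x => x) false
    have hmem : ∀ z : Int, z ∈ PySem.List.sorted arr (fun x => x) false ↔ z ∈ arr :=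
      fun z => hperm.mem_iff
    have hlen : (PySem.List.sorted arr (fun x => x) false).length = arr.length := hperm.length_eq
    set s := PySem.List.sorted arr (fun x => x) false with hs
    apply le_antisymm
    · -- A ≤ B: every value A folds in is x % d for nonzero elements d ≤ x, and B reaches those
      unfold maxModValue
      rw [← hs]
      refine pvOuterA_le s hp n (pvAltEl arr)
        (fun e he d' hd' hd1 hde =>
          pvAlt_reaches arr e d' ((hmem e).mp he) ((hmem d').mp hd') (by omega) hde)
        _ ?_ 0 le_rfl (pvAlt_nonneg arr)
      intro j hjmem
      have := PySem.List.mem_pyRange_neg_one.mp hjmem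
      omega
    · -- B ≤ A: every pair value x % d (d ≠ 0, d ≤ x) is reached by A
      have hA0 : 0 ≤ maxModValue arr n := by
        unfold maxModValue
        rw [← hs]
        exact pvOuterA_ge_acc s n _ 0
      refine pvAlt_le arr _ ?_ hA0
      intro x hx d hd hd0 hdx
      rcases lt_or_gt_of_ne hd0 with hneg | hpos
      · exact le_trans (PySem.Int.mod_neg_bounds x hneg).2 hA0
      · by_cases hbig : ∃ y ∈ s, d < y
        · obtain ⟨y, hy, hdy⟩ := hbig
          obtain ⟨j, hj1, hsj, hslt⟩ := pvExistsSuccGt s hp d y ((hmem d).mpr hd) hy hdy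
          unfold maxModValue
          rw [← hs]
          have hn' : n = (s.length : Int) := by rw [hn, hlen]
          have hcast : n - 2 = ((s.length - 1 : Nat) : Int) - 1 := by
            rw [hn']; push_cast; omega
          rw [hcast]
          exact pvOuterA_reaches s hp n hn' x d ((hmem x).mpr hx) (by omega) hdx
            j hj1 hsj hslt (s.length - 1) (by omega) (by omega) 0 le_rfl
        · have hall : ∀ y ∈ s, y ≤ d := fun y hy => le_of_not_gt (fun h => hbig ⟨y, hy, h⟩)
          have hxd : x = d := le_antisymm (hall x ((hmem x).mpr hx)) hdx
          have : PySem.Int.mod x d = 0 := by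
            rw [hxd]
            exact (PySem.Int.mod_eq_zero_iff_dvd d d).mpr dvd_rfl
          rw [this]
          exact hA0
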